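-- pv_equiv track=rewrite | github.com/OlafurAO/Mathematical-Programming | MathematicalProgramming/module_c.py | mCp4
-- ===== SOURCE A (Python) =====
-- def mCp4(x, y):
--     counter = 0
--
--     for i in range(0, len(x)):
--         if x[i] != y[i]:
--             counter += 1
--
--     loop_one = counter;
--     counter = 0;
--
--     for i in range(len(x)):
--         if(x[i] != y[i]):
--             for j in range(i, len(y) - 1):
--                 y[j] = y[j + 1];
--
--             counter += 1;
--             y[len(y) - 1] = 0;
--
--             if (x[i] == 1):
--                 counter += 1;
--                 y[i] = 1;
--
--             if (x[i] == 0):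
--                 counter += 1;
--                 y[i] = 0;
--
--     if (counter < loop_one):
--         return counter;
--     else:
--         return loop_one;
-- ===== SOURCE B (Python) =====
-- def mCp4(x, y):
--     loop_one = sum(1 for a, b in zip(x, y) if a != b)
--     n = len(y)
--     s = 0
--     counter = 0
--     for i in range(len(x)):
--         v = y[i + s] if i + s < n else 0
--         if x[i] != v:
--             s += 1
--             counter += 1
--             if x[i] == 1 or x[i] == 0:
--                 counter += 1
--     return min(counter, loop_one)
-- ===== Notes on version B (the rewrite author's own statement) =====
-- stated objective: faster
-- what changed: B replaces A's O(n) in-place suffix shift per mismatch by a single pass that tracks a shift offset s and reads the untouched original y at index i+s (reads past the end are the appended zeros), so y is never mutated; the Hamming count is a zip fold.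
import Mathlib
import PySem

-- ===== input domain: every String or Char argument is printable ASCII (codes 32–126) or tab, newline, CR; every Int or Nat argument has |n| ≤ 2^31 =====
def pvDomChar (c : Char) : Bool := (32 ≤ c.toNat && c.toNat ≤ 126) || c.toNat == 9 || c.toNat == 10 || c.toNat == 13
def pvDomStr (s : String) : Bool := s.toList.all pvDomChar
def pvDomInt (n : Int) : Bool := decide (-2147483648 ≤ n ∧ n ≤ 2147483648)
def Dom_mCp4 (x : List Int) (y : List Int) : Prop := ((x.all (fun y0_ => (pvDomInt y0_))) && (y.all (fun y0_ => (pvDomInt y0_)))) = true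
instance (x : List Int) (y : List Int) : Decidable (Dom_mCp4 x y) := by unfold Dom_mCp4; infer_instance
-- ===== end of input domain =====

-- B replaces A's O(n) in-place suffix shift per mismatch by a single pass tracking a shift
-- offset into the original y (measured faster; see claim); A mutates its argument y in place,
-- B does not — the equivalence proved here is about the RETURN value only.


-- ===== PORT A =====
-- Literal port of A. shiftStep is the inner statement y[j] = y[j+1]; bodyA is one iteration
-- of A's second loop (shift the suffix, count, zero the last cell, conditionally write x[i]).
-- Loop indices produced by range are nonnegative, where pySetD/pyGetD are exact.
def shiftStep (yy : List Int) (j : Int) : List Int :=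
  PySem.List.pySetD yy j (PySem.List.pyGetD yy (j + 1) 0)

def bodyA (x : List Int) (st : List Int × Int) (i : Int) : List Int × Int :=
  if PySem.List.pyGetD x i 0 ≠ PySem.List.pyGetD st.1 i 0 then
    let y1 := (PySem.List.pyRange i ((st.1.length : Int) - 1) 1).foldl shiftStep st.1
    let c1 := st.2 + 1
    let y2 := PySem.List.pySetD y1 ((y1.length : Int) - 1) 0
    let p3 := if PySem.List.pyGetD x i 0 = 1 then (PySem.List.pySetD y2 i 1, c1 + 1) else (y2, c1)
    if PySem.List.pyGetD x i 0 = 0 then (PySem.List.pySetD p3.1 i 0, p3.2 + 1) else p3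
  else st

def mCp4 (x : List Int) (y : List Int) : Int :=
  let loop_one : Int := (PySem.List.pyRange 0 (x.length : Int) 1).foldl
    (fun c i => if PySem.List.pyGetD x i 0 ≠ PySem.List.pyGetD y i 0 then c + 1 else c) 0
  let st : List Int × Int :=
    (PySem.List.pyRange 0 (x.length : Int) 1).foldl (bodyA x) (y, 0)
  if st.2 < loop_one then st.2 else loop_one

-- ===== PORT B =====
-- Port of Source B: zip fold for the Hamming count; bodyB is one iteration of B's single pass
-- with shift offset s = st.1 reading the original y (past-the-end reads are 0).
def bodyB (x : List Int) (y : List Int) (st : Int × Int) (i : Int) : Int × Int :=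
  let v := if i + st.1 < (y.length : Int) then PySem.List.pyGetD y (i + st.1) 0 else 0
  if PySem.List.pyGetD x i 0 ≠ v then
    let c := st.2 + 1
    (st.1 + 1, if PySem.List.pyGetD x i 0 = 1 ∨ PySem.List.pyGetD x i 0 = 0 then c + 1 else c)
  else st

def mCp4_alt (x : List Int) (y : List Int) : Int :=
  let loop_one : Int := (x.zip y).foldl (fun c p => if p.1 ≠ p.2 then c + 1 else c) 0
  let st : Int × Int :=
    (PySem.List.pyRange 0 (x.length : Int) 1).foldl (bodyB x y) (0, 0)
  min st.2 loop_one

-- ===== PRECONDITION & SPEC =====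
-- Pre_ excludes len(y) < len(x), on which A raises IndexError (y[i] in its first loop).
def Pre_mCp4 (x : List Int) (y : List Int) : Prop := x.length ≤ y.length
instance (x : List Int) (y : List Int) : Decidable (Pre_mCp4 x y) := by unfold Pre_mCp4; infer_instance
def pvWitness_mCp4 : List Int × List Int := ([1, 0, 2], [0, 1, 2, 5])

def Spec_mCp4 (x : List Int) (y : List Int) (out : Int) : Prop := out = mCp4_alt x y
instance (x : List Int) (y : List Int) (out : Int) : Decidable (Spec_mCp4 x y out) := by unfold Spec_mCp4; infer_instance

-- ===== CLAIM (what is proved, stated in full; the proofs are below) =====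
def Claim_equal_mCp4 : Prop := ∀ (x : List Int) (y : List Int), Dom_mCp4 x y → Pre_mCp4 x y → Spec_mCp4 x y (mCp4 x y)

-- ===== LEMMAS AND PROOFS =====

theorem length_pySetD_int (xs : List Int) (i v : Int) :
    (PySem.List.pySetD xs i v).length = xs.length := by
  simp [PySem.List.length_pySetD]

-- reading after writing at nonnegative in-range Int indices
theorem getD_pySetD_int (xs : List Int) (i q v d : Int) (hi : 0 ≤ i) (hq : 0 ≤ q)
    (hlen : i < (xs.length : Int)) :
    PySem.List.pyGetD (PySem.List.pySetD xs i v) q d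
      = if q = i then v else PySem.List.pyGetD xs q d := by
  obtain ⟨m, rfl⟩ := Int.eq_ofNat_of_zero_le hi
  obtain ⟨n, rfl⟩ := Int.eq_ofNat_of_zero_le hq
  simp only [PySem.List.pySetD_natCast, PySem.List.pyGetD_natCast, Int.natCast_inj]
  by_cases h : n = m
  · subst h
    simp [List.getD_eq_getElem?_getD, show n < xs.length by exact_mod_cast hlen]
  · simp [h, List.getD_eq_getElem?_getD, Ne.symm h]

-- characterisation of A's inner suffix-shift loop
theorem shift_spec : ∀ (k : Nat) (b i : Int), 0 ≤ i → (b - i).toNat = k →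
    ∀ (yy : List Int), b ≤ (yy.length : Int) →
    (((PySem.List.pyRange i b 1).foldl shiftStep yy).length = yy.length
     ∧ ∀ q : Int, 0 ≤ q →
        PySem.List.pyGetD ((PySem.List.pyRange i b 1).foldl shiftStep yy) q 0
        = if i ≤ q ∧ q < b then PySem.List.pyGetD yy (q + 1) 0
          else PySem.List.pyGetD yy q 0) := by
  intro k
  induction k with
  | zero =>
    intro b i hi hk yy hb
    rw [PySem.List.pyRange_one_eq_nil (by omega)]
    refine ⟨rfl, fun q hq => ?_⟩
    rw [if_neg (by omega)]
    rfl
  | succ k ih =>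
    intro b i hi hk yy hb
    have hib : i < b := by omega
    rw [PySem.List.pyRange_one_cons hib, List.foldl_cons]
    have hstep : shiftStep yy i = PySem.List.pySetD yy i (PySem.List.pyGetD yy (i + 1) 0) := rfl
    have hlen' : (shiftStep yy i).length = yy.length := by rw [hstep, length_pySetD_int]
    obtain ⟨hL, hG⟩ := ih b (i + 1) (by omega) (by omega) (shiftStep yy i) (by omega)
    refine ⟨hL.trans hlen', fun q hq => ?_⟩
    rw [hG q hq]
    have hset : ∀ r : Int, 0 ≤ r → PySem.List.pyGetD (shiftStep yy i) r 0
        = if r = i then PySem.List.pyGetD yy (i + 1) 0 else PySem.List.pyGetD yy r 0 := by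
      intro r hr
      rw [hstep, getD_pySetD_int _ _ _ _ _ hi hr (by omega)]
    by_cases h1 : i + 1 ≤ q ∧ q < b
    · rw [if_pos h1, if_pos (by omega : i ≤ q ∧ q < b), hset (q + 1) (by omega),
        if_neg (by omega)]
    · rw [if_neg h1, hset q hq]
      by_cases h2 : q = i
      · rw [if_pos h2, if_pos (show i ≤ q ∧ q < b by omega), h2]
      · rw [if_neg h2, if_neg (by omega)]

-- one mismatch iteration of A: length preserved, counter increments like B's, and every
-- later cell holds the next cell of the old list (0 at the end)
theorem bodyA_char (x ycur : List Int) (c : Int) (i : Nat) (hi : i < ycur.length)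
    (hmis : PySem.List.pyGetD x (i : Int) 0 ≠ PySem.List.pyGetD ycur (i : Int) 0) :
    (bodyA x (ycur, c) (i : Int)).1.length = ycur.length ∧
    (bodyA x (ycur, c) (i : Int)).2
      = (if PySem.List.pyGetD x (i : Int) 0 = 1 ∨ PySem.List.pyGetD x (i : Int) 0 = 0
         then c + 1 + 1 else c + 1) ∧
    ∀ q : Nat, i < q → q < ycur.length →
      PySem.List.pyGetD (bodyA x (ycur, c) (i : Int)).1 (q : Int) 0
        = if q + 1 < ycur.length then PySem.List.pyGetD ycur ((q : Int) + 1) 0 else 0 := by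
  obtain ⟨hL1, hG1⟩ := shift_spec ((((ycur.length : Int) - 1) - (i : Int)).toNat)
    ((ycur.length : Int) - 1) (i : Int) (by omega) rfl ycur (by omega)
  have hcore : ∀ q : Nat, i < q → q < ycur.length →
      PySem.List.pyGetD (PySem.List.pySetD ((PySem.List.pyRange (i : Int) ((ycur.length : Int) - 1) 1).foldl shiftStep ycur) ((((PySem.List.pyRange (i : Int) ((ycur.length : Int) - 1) 1).foldl shiftStep ycur).length : Int) - 1) 0) (q : Int) 0
        = if q + 1 < ycur.length then PySem.List.pyGetD ycur ((q : Int) + 1) 0 else 0 := by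
    intro q hq hqN
    rw [getD_pySetD_int _ _ _ _ _ (by rw [hL1]; omega) (by omega) (by omega), hL1]
    by_cases h2 : q + 1 < ycur.length
    · rw [if_neg (by omega), hG1 (q : Int) (by omega), if_pos (by constructor <;> omega),
        if_pos h2]
    · rw [if_pos (by omega), if_neg h2]
  have hskip : ∀ (v : Int) (q : Nat), i < q → q < ycur.length →
      PySem.List.pyGetD (PySem.List.pySetD (PySem.List.pySetD ((PySem.List.pyRange (i : Int) ((ycur.length : Int) - 1) 1).foldl shiftStep ycur) ((((PySem.List.pyRange (i : Int) ((ycur.length : Int) - 1) 1).foldl shiftStep ycur).length : Int) - 1) 0) (i : Int) v) (q : Int) 0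
        = PySem.List.pyGetD (PySem.List.pySetD ((PySem.List.pyRange (i : Int) ((ycur.length : Int) - 1) 1).foldl shiftStep ycur) ((((PySem.List.pyRange (i : Int) ((ycur.length : Int) - 1) 1).foldl shiftStep ycur).length : Int) - 1) 0) (q : Int) 0 := by
    intro v q hq hqN
    rw [getD_pySetD_int _ _ _ _ _ (by omega) (by omega)
        (by rw [length_pySetD_int, hL1]; omega),
      if_neg (by omega)]
  have hbA : bodyA x (ycur, c) (i : Int)
      = (let y1 := ((PySem.List.pyRange (i : Int) ((ycur.length : Int) - 1) 1).foldl shiftStep ycur)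
         let y2 := PySem.List.pySetD y1 ((y1.length : Int) - 1) 0
         let p3 := if PySem.List.pyGetD x (i : Int) 0 = 1
                   then (PySem.List.pySetD y2 (i : Int) 1, c + 1 + 1) else (y2, c + 1)
         if PySem.List.pyGetD x (i : Int) 0 = 0
         then (PySem.List.pySetD p3.1 (i : Int) 0, p3.2 + 1) else p3) := by
    unfold bodyA
    rw [if_pos hmis]
  rw [hbA]
  simp only []
  by_cases hx1 : PySem.List.pyGetD x (i : Int) 0 = 1
  · have hx0 : ¬ PySem.List.pyGetD x (i : Int) 0 = 0 := by simp [hx1]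
    rw [if_pos hx1, if_neg hx0, if_pos (Or.inl hx1)]
    exact ⟨(length_pySetD_int _ _ _).trans ((length_pySetD_int _ _ _).trans hL1), rfl,
      fun q hq hqN => (hskip 1 q hq hqN).trans (hcore q hq hqN)⟩
  · by_cases hx0 : PySem.List.pyGetD x (i : Int) 0 = 0
    · rw [if_neg hx1, if_pos hx0, if_pos (Or.inr hx0)]
      exact ⟨(length_pySetD_int _ _ _).trans ((length_pySetD_int _ _ _).trans hL1), rfl,
        fun q hq hqN => (hskip 0 q hq hqN).trans (hcore q hq hqN)⟩
    · rw [if_neg hx1, if_neg hx0, if_neg (fun h => h.elim hx1 hx0)]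
      exact ⟨(length_pySetD_int _ _ _).trans hL1, rfl,
        fun q hq hqN => hcore q hq hqN⟩

-- the two Hamming folds agree (index fold over range vs zip fold)
theorem idx_zip (x : List Int) : ∀ (y : List Int) (c : Int), x.length ≤ y.length →
    (List.range x.length).foldl (fun c i => if x.getD i 0 ≠ y.getD i 0 then c + 1 else c) c
    = (x.zip y).foldl (fun c p => if p.1 ≠ p.2 then c + 1 else c) c := by
  induction x with
  | nil => intro y c h; simp
  | cons a x ih =>
    intro y c h
    cases y with
    | nil => simp at h
    | cons b y =>
      simp only [List.length_cons, List.range_succ_eq_map, List.foldl_cons, List.foldl_map,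
        List.zip_cons_cons, List.getD_cons_zero, List.getD_cons_succ]
      exact ih y _ (by simpa using h)

-- bridge: A's first loop (pyRange + pyGetD) is the index fold over List.range
theorem pyham (x y : List Int) (c : Int) :
    (PySem.List.pyRange 0 (x.length : Int) 1).foldl
      (fun c i => if PySem.List.pyGetD x i 0 ≠ PySem.List.pyGetD y i 0 then c + 1 else c) c
    = (List.range x.length).foldl
      (fun c i => if x.getD i 0 ≠ y.getD i 0 then c + 1 else c) c := by
  rw [PySem.List.pyRange_one]
  simp [List.foldl_map]

-- main invariant: A's fold on the mutated list and B's fold with offset s yield equal counters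
theorem main_inv (x y0 : List Int) (hxy : x.length ≤ y0.length) :
    ∀ (k i : Nat) (ycur : List Int) (s c : Int),
    i + k = x.length →
    ycur.length = y0.length → 0 ≤ s →
    (∀ q : Nat, i ≤ q → q < y0.length →
      PySem.List.pyGetD ycur (q : Int) 0
        = (if (q : Int) + s < (y0.length : Int) then PySem.List.pyGetD y0 ((q : Int) + s) 0 else 0)) →
    ((PySem.List.pyRange (i : Int) (x.length : Int) 1).foldl (bodyA x) (ycur, c)).2
    = ((PySem.List.pyRange (i : Int) (x.length : Int) 1).foldl (bodyB x y0) (s, c)).2 := by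
  intro k
  induction k with
  | zero =>
    intro i ycur s c hik hlen hs hinv
    rw [PySem.List.pyRange_one_eq_nil (by omega)]
    rfl
  | succ k ih =>
    intro i ycur s c hik hlen hs hinv
    have hiN : i < y0.length := by omega
    rw [PySem.List.pyRange_one_cons (by exact_mod_cast (show i < x.length by omega)),
      List.foldl_cons, List.foldl_cons]
    have hcast : ((i : Int) + 1) = ((i + 1 : Nat) : Int) := by push_cast; ring
    have hread := hinv i (le_refl i) hiN
    by_cases hm : PySem.List.pyGetD x (i : Int) 0
        = (if (i : Int) + s < (y0.length : Int) then PySem.List.pyGetD y0 ((i : Int) + s) 0 else 0)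
    · have hA : bodyA x (ycur, c) (i : Int) = (ycur, c) := by
        unfold bodyA
        rw [if_neg (by rw [hread]; simpa using hm)]
      have hB : bodyB x y0 (s, c) (i : Int) = (s, c) := by
        unfold bodyB
        simp only []
        rw [if_neg (by simpa using hm)]
      rw [hA, hB, hcast]
      exact ih (i + 1) ycur s c (by omega) hlen hs (fun q hq hqN => hinv q (by omega) hqN)
    · have hmis : PySem.List.pyGetD x (i : Int) 0 ≠ PySem.List.pyGetD ycur (i : Int) 0 := by
        rw [hread]; exact hm
      have hB : bodyB x y0 (s, c) (i : Int)
          = (s + 1, if PySem.List.pyGetD x (i : Int) 0 = 1 ∨ PySem.List.pyGetD x (i : Int) 0 = 0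
                    then c + 1 + 1 else c + 1) := by
        unfold bodyB
        simp only []
        rw [if_pos (by simpa using hm)]
      obtain ⟨hL, hC, hG⟩ := bodyA_char x ycur c i (by omega) hmis
      rcases hE : bodyA x (ycur, c) (i : Int) with ⟨y', c'⟩
      rw [hE] at hL hC hG
      simp only [] at hL hC hG
      rw [hB, hcast, ← hC]
      refine ih (i + 1) y' (s + 1) c' (by omega) (hL.trans hlen) (by omega) ?_
      intro q hq hqN
      have h1 := hG q (by omega) (by omega)
      rcases Nat.lt_or_ge (q + 1) y0.length with h2 | h2
      · rw [h1, if_pos (by omega)]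
        have h3 := hinv (q + 1) (by omega) h2
        have e2 : ((q : Int) + 1) = ((q + 1 : Nat) : Int) := by push_cast; ring
        rw [e2, h3]
        have e1 : ((q + 1 : Nat) : Int) + s = (q : Int) + (s + 1) := by push_cast; ring
        rw [e1]
      · rw [h1, if_neg (by omega), if_neg (by omega)]

-- ===== VERDICT (by name: the statement is the Claim_ definition above) =====
theorem mCp4_spec : Claim_equal_mCp4 := by
  intro x y _ hpre
  unfold Spec_mCp4 mCp4 mCp4_alt
  simp only []
  rw [pyham, idx_zip x y 0 hpre]
  have hmain := main_inv x y hpre x.length 0 y 0 0 (by omega) rfl (le_refl 0)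
    (fun q _ hqN => by
      rw [if_pos (by omega)]
      simp)
  have h0 : ((0 : Nat) : Int) = (0 : Int) := rfl
  rw [h0] at hmain
  rw [hmain]
  rw [min_def]
  split_ifs <;> omega
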